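-- pv_equiv track=rewrite | github.com/Generative-Logic/GL | verifier.py | build_chapter_theorem_map
-- ===== SOURCE A (Python) =====
-- from typing import Dict, List, Tuple, Optional
--
-- def build_chapter_theorem_map(
--     chapter_files: List[str],
--     theorem_list: List[Tuple[str, str, str]],
-- ) -> Dict[str, Tuple[str, str, str]]:
--     """Returns chapter_filename → (theorem_expr, theorem_type, theorem_ref)."""
--     mapping: Dict[str, Tuple[str, str, str]] = {}
--     ci = 0
--     for thm_expr, thm_type, thm_ref in theorem_list:
--         if ci >= len(chapter_files):
--             break
--         if thm_type == "induction":
--             mapping[chapter_files[ci]] = (thm_expr, thm_type, thm_ref)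
--             if ci + 1 < len(chapter_files):
--                 mapping[chapter_files[ci + 1]] = (thm_expr, thm_type, thm_ref)
--             ci += 2
--         else:
--             mapping[chapter_files[ci]] = (thm_expr, thm_type, thm_ref)
--             ci += 1
--     return mapping
-- ===== SOURCE B (Python) =====
-- from typing import Dict, List, Tuple
--
--
-- def build_chapter_theorem_map(
--     chapter_files: List[str],
--     theorem_list: List[Tuple[str, str, str]],
-- ) -> Dict[str, Tuple[str, str, str]]:
--     """Returns chapter_filename -> (theorem_expr, theorem_type, theorem_ref).
--
--     Dual traversal: iterate over the chapter files (not the theorems), pulling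
--     theorems from an iterator; an induction theorem leaves a 'carry' that the
--     next chapter file consumes. No index arithmetic at all.
--     """
--     mapping: Dict[str, Tuple[str, str, str]] = {}
--     thms = iter(theorem_list)
--     carry = None
--     for chapter in chapter_files:
--         if carry is not None:
--             mapping[chapter] = carry
--             carry = None
--         else:
--             t = next(thms, None)
--             if t is None:
--                 break
--             mapping[chapter] = t
--             if t[1] == "induction":
--                 carry = t
--     return mapping
-- ===== Notes on version B (the rewrite author's own statement) =====
-- stated objective: alternative
-- what changed: Inverts the traversal: instead of looping over theorems and advancing a chapter index by 1 or 2 with bounds guards, B loops over the chapter files, pulling theorems from an iterator and carrying an induction theorem over to the next chapter via an Optional carry slot.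
import Mathlib
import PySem

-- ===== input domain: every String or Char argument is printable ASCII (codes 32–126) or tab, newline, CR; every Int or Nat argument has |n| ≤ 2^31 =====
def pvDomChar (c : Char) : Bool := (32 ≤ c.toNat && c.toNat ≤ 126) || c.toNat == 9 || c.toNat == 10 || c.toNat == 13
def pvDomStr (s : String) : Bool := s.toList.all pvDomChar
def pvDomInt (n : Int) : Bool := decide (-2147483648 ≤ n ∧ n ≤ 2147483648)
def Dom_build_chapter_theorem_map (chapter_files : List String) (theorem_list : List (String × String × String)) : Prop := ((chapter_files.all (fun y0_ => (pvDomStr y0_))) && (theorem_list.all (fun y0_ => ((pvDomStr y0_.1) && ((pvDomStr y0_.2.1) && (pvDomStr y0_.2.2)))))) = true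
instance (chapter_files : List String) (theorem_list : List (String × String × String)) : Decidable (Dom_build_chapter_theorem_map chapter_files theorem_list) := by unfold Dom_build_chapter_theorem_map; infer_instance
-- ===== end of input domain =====

-- B inverts the traversal: it loops over the chapter files pulling theorems from the
-- list, carrying an induction theorem to the next chapter via an Option slot, instead
-- of A's theorem loop with a chapter index advanced by 1 or 2 (objective: alternative).

-- ===== PORT A =====
-- A's for-loop with the `ci` counter and `break`, as structural recursion over
-- theorem_list with state (mapping, ci). The guards `ci >= len` / `ci + 1 < len`
-- ensure every index access is in range, so `getD _ ""` is exact for `chapter_files[ci]`.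
def pvLoopA (cf : List String) : List (String × String × String) →
    PySem.Dict String (String × String × String) → Nat →
    PySem.Dict String (String × String × String)
  | [], m, _ => m
  | t :: rest, m, ci =>
    if cf.length ≤ ci then m
    else if t.2.1 == "induction" then
      let m1 := m.insert (cf.getD ci "") t
      let m2 := if ci + 1 < cf.length then m1.insert (cf.getD (ci + 1) "") t else m1
      pvLoopA cf rest m2 (ci + 2)
    else
      pvLoopA cf rest (m.insert (cf.getD ci "") t) (ci + 1)

def build_chapter_theorem_map (chapter_files : List String) (theorem_list : List (String × String × String)) : List (String × String × String × String) :=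
  (pvLoopA chapter_files theorem_list PySem.Dict.empty 0).items

-- ===== PORT B =====
-- B's for-loop over chapter_files with the iterator (remaining theorem list) and
-- the `carry` Option, as structural recursion over the chapter-file list.
def pvLoopB : List String → List (String × String × String) →
    Option (String × String × String) →
    PySem.Dict String (String × String × String) →
    PySem.Dict String (String × String × String)
  | [], _, _, m => m
  | c :: cs, thms, some t, m => pvLoopB cs thms none (m.insert c t)
  | c :: cs, thms, none, m =>
    match thms with
    | [] => m
    | t :: ts =>
      pvLoopB cs ts (if t.2.1 == "induction" then some t else none) (m.insert c t)

def build_chapter_theorem_map_alt (chapter_files : List String) (theorem_list : List (String × String × String)) : List (String × String × String × String) :=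
  (pvLoopB chapter_files theorem_list none PySem.Dict.empty).items

-- ===== PRECONDITION & SPEC =====
def Spec_build_chapter_theorem_map (chapter_files : List String) (theorem_list : List (String × String × String)) (out : List (String × String × String × String)) : Prop := out = build_chapter_theorem_map_alt chapter_files theorem_list
instance (chapter_files : List String) (theorem_list : List (String × String × String)) (out : List (String × String × String × String)) : Decidable (Spec_build_chapter_theorem_map chapter_files theorem_list out) := by unfold Spec_build_chapter_theorem_map; infer_instance

-- ===== CLAIM (what is proved, stated in full; the proofs are below) =====
def Claim_equal_build_chapter_theorem_map : Prop := ∀ (chapter_files : List String) (theorem_list : List (String × String × String)), Dom_build_chapter_theorem_map chapter_files theorem_list → Spec_build_chapter_theorem_map chapter_files theorem_list (build_chapter_theorem_map chapter_files theorem_list)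

-- ===== LEMMAS AND PROOFS =====

-- A's loop at state (m, ci) equals B's loop over the remaining chapter files
-- (cf.drop ci) with empty carry and the same remaining theorems and dict.
theorem pvLoopA_eq_pvLoopB (cf : List String) (tl : List (String × String × String)) :
    ∀ (m : PySem.Dict String (String × String × String)) (ci : Nat),
    pvLoopA cf tl m ci = pvLoopB (cf.drop ci) tl none m := by
  induction tl with
  | nil =>
    intro m ci
    cases cf.drop ci <;> simp [pvLoopA, pvLoopB]
  | cons t rest ih =>
    intro m ci
    by_cases hci : cf.length ≤ ci
    · rw [List.drop_eq_nil_of_le hci]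
      simp [pvLoopA, pvLoopB, hci]
    · have hci' : ci < cf.length := Nat.lt_of_not_le hci
      rw [List.drop_eq_getElem_cons hci']
      by_cases hind : (t.2.1 == "induction") = true
      · by_cases h2 : ci + 1 < cf.length
        · simp only [pvLoopA, if_neg hci, hind, if_pos h2, if_true, List.getD,
            List.getElem?_eq_getElem hci', List.getElem?_eq_getElem h2, Option.getD_some]
          rw [ih]
          conv_rhs => rw [List.drop_eq_getElem_cons h2, pvLoopB]
          rw [if_pos hind, pvLoopB]
        · have hnil1 : cf.drop (ci + 1) = [] := List.drop_eq_nil_of_le (by omega)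
          have hnil2 : cf.drop (ci + 2) = [] := List.drop_eq_nil_of_le (by omega)
          simp only [pvLoopA, if_neg hci, hind, if_neg h2, if_true, List.getD,
            List.getElem?_eq_getElem hci', Option.getD_some]
          rw [ih, hnil2]
          simp [pvLoopB, hind, hnil1]
      · simp only [pvLoopA, if_neg hci, hind, List.getD,
          List.getElem?_eq_getElem hci', Option.getD_some, Bool.false_eq_true, if_false]
        rw [ih]
        simp [pvLoopB, hind]

-- ===== VERDICT (by name: the statement is the Claim_ definition above) =====
theorem build_chapter_theorem_map_spec : Claim_equal_build_chapter_theorem_map := by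
  intro cf tl _
  unfold Spec_build_chapter_theorem_map build_chapter_theorem_map build_chapter_theorem_map_alt
  rw [pvLoopA_eq_pvLoopB cf tl PySem.Dict.empty 0, List.drop_zero]
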